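-- pv_equiv track=rewrite | github.com/Moodyjazz47/conversational-real-estate-search | ai_search/entity_postprocessing/canonical_mapping.py | reverse_lookup
-- ===== SOURCE A (Python) =====
-- def reverse_lookup(value, mapping_dict):
--     """
--     Convert a synonym into its canonical form.
--     """
--     if not value:
--         return value
--
--     value = value.lower()
--
--     for canonical, synonyms in mapping_dict.items():
--         if value in synonyms:
--             return canonical
--
--     return value  # fallback
-- ===== SOURCE B (Python) =====
-- def reverse_lookup(value, mapping_dict):
--     """
--     Convert a synonym into its canonical form.
--     """
--     if not value:
--         return value
--
--     value = value.lower()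
--
--     reverse = {}
--     for canonical, synonyms in mapping_dict.items():
--         for syn in synonyms:
--             reverse.setdefault(syn, canonical)
--
--     return reverse.get(value, value)
-- ===== Notes on version B (the rewrite author's own statement) =====
-- stated objective: idiomatic
-- what changed: B builds a reverse synonym->canonical index once with dict.setdefault (first canonical wins, matching A's first-match scan) and answers with a single reverse.get(value, value) lookup, instead of A's linear scan with a membership test per entry.
import Mathlib
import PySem

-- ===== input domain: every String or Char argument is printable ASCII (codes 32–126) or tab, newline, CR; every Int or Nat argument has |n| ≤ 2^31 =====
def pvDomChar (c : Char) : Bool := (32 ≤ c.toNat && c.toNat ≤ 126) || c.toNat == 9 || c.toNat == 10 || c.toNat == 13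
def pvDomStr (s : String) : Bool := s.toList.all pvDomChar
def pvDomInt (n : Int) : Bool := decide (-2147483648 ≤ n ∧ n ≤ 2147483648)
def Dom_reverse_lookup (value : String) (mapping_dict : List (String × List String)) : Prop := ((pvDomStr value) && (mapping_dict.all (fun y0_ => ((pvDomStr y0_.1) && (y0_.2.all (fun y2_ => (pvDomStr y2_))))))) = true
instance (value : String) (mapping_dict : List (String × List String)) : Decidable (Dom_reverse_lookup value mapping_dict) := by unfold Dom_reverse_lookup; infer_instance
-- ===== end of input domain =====

-- B builds a reverse synonym->canonical index with setdefault (first canonical wins) and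
-- answers with one lookup, instead of A's first-match scan; return values proved equal.

-- ===== PORT A =====
-- the `for canonical, synonyms in mapping_dict.items(): if value in synonyms: return canonical` loop
def reverseLookupScan (v : String) : List (String × List String) → String
  | [] => v
  | (c, syns) :: rest => if v ∈ syns then c else reverseLookupScan v rest

def reverse_lookup (value : String) (mapping_dict : List (String × List String)) : String :=
  if value = "" then value
  else reverseLookupScan (PySem.Str.lower value) mapping_dict

-- ===== PORT B =====
def reverse_lookup_alt (value : String) (mapping_dict : List (String × List String)) : String :=
  if value = "" then value
  else
    let v := PySem.Str.lower value
    let reverse : PySem.Dict String String :=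
      mapping_dict.foldl
        (fun d p => p.2.foldl (fun d syn => d.setdefault syn p.1) d) PySem.Dict.empty
    reverse.getD v v

-- ===== PRECONDITION & SPEC =====
def Spec_reverse_lookup (value : String) (mapping_dict : List (String × List String)) (out : String) : Prop := out = reverse_lookup_alt value mapping_dict
instance (value : String) (mapping_dict : List (String × List String)) (out : String) : Decidable (Spec_reverse_lookup value mapping_dict out) := by unfold Spec_reverse_lookup; infer_instance

-- ===== CLAIM (what is proved, stated in full; the proofs are below) =====
def Claim_equal_reverse_lookup : Prop := ∀ (value : String) (mapping_dict : List (String × List String)), Dom_reverse_lookup value mapping_dict → Spec_reverse_lookup value mapping_dict (reverse_lookup value mapping_dict)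

-- ===== LEMMAS AND PROOFS =====

-- first match of the scan, as an Option
def scanFirst? (v : String) : List (String × List String) → Option String
  | [] => none
  | (c, syns) :: rest => if v ∈ syns then some c else scanFirst? v rest

theorem get?_setdefault' (d : PySem.Dict String String) (k c v : String) :
    (d.setdefault k c).get? v = (d.get? v).or (if v = k then some c else none) := by
  by_cases h : d.contains k
  · rw [PySem.Dict.setdefault_of_contains d (v:=c) h]
    by_cases hv : v = k
    · subst hv
      rw [PySem.Dict.contains_eq_isSome_get?] at h
      cases hg : d.get? v <;> simp [hg] at h ⊢
    · simp [hv]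
  · rw [PySem.Dict.setdefault_of_not_contains d (v:=c) (by simpa using h)]
    rw [PySem.Dict.get?_insert]
    by_cases hv : v = k
    · subst hv
      rw [PySem.Dict.contains_eq_isSome_get?] at h
      cases hg : d.get? v <;> simp [hg] at h ⊢
    · simp [hv]

theorem inner_fold_get? (v c : String) (syns : List String) (d : PySem.Dict String String) :
    (syns.foldl (fun d syn => d.setdefault syn c) d).get? v
      = (d.get? v).or (if v ∈ syns then some c else none) := by
  induction syns generalizing d with
  | nil => simp
  | cons s rest ih =>
    simp only [List.foldl_cons, ih, get?_setdefault', List.mem_cons]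
    by_cases hv : v = s
    · subst hv; cases d.get? v <;> simp
    · cases d.get? v <;> simp [hv]

theorem outer_fold_get? (v : String) (m : List (String × List String)) (d : PySem.Dict String String) :
    (m.foldl (fun d p => p.2.foldl (fun d syn => d.setdefault syn p.1) d) d).get? v
      = (d.get? v).or (scanFirst? v m) := by
  induction m generalizing d with
  | nil => simp [scanFirst?]
  | cons p rest ih =>
    simp only [List.foldl_cons, ih, inner_fold_get?, scanFirst?]
    cases d.get? v <;> split <;> simp

theorem scan_eq_scanFirst (v : String) (m : List (String × List String)) :
    reverseLookupScan v m = (scanFirst? v m).getD v := by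
  induction m with
  | nil => simp [reverseLookupScan, scanFirst?]
  | cons p rest ih =>
    obtain ⟨c, syns⟩ := p
    simp only [reverseLookupScan, scanFirst?]
    split <;> simp [ih]

-- ===== VERDICT (by name: the statement is the Claim_ definition above) =====
theorem reverse_lookup_spec : Claim_equal_reverse_lookup := by
  intro value mapping_dict _
  unfold Spec_reverse_lookup reverse_lookup reverse_lookup_alt
  by_cases h : value = ""
  · simp [h]
  · simp only [h, if_false]
    rw [PySem.Dict.getD_eq_get?_getD, outer_fold_get?, PySem.Dict.get?_empty,
      scan_eq_scanFirst]
    simp
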